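-- pv_equiv track=rewrite | github.com/AlviseSembenico/CP | codeforces/mix/B_Down_with_Brackets.py | bl
-- ===== SOURCE A (Python) =====
-- def bl(s):
--     st = 0
--     for i, c in enumerate(s):
--         if c == "(":
--             st += 1
--         elif c == ")":
--             st -= 1
--             if st == 0 and i != len(s) - 1:
--                 return "YES"
--     return "NO"
-- ===== SOURCE B (Python) =====
-- def bl(s):
--     # Reverse-direction search: precompute the total balance with str.count,
--     # then walk from the tail keeping the suffix balance; the prefix ending at i
--     # is balanced exactly when the suffix balance equals the total.
--     if not s:
--         return "NO"
--     total = s.count("(") - s.count(")")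
--     suf = (s[-1] == "(") - (s[-1] == ")")
--     for i in range(len(s) - 2, -1, -1):
--         if s[i] == ")" and suf == total:
--             return "YES"
--         suf += (s[i] == "(") - (s[i] == ")")
--     return "NO"
-- ===== Notes on version B (the rewrite author's own statement) =====
-- stated objective: alternative
-- what changed: A scans forward with a running prefix balance and returns at the first balanced proper prefix; B precomputes the total balance with two str.count passes and then searches backwards from the tail maintaining the suffix balance, detecting a balanced prefix as suffix-balance == total.
import Mathlib
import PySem

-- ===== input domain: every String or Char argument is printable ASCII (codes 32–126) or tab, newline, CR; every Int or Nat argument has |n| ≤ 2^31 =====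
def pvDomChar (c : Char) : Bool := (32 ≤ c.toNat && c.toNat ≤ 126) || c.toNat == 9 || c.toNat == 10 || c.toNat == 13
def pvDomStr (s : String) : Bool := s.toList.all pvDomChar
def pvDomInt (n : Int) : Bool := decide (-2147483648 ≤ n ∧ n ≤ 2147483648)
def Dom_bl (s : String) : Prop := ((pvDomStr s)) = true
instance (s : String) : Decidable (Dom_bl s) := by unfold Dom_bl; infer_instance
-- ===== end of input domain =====

-- B replaces A's forward early-return scan by two str.count passes plus a backward
-- scan maintaining the suffix balance (a balanced prefix ⇔ suffix balance = total).

-- ===== PORT A =====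
-- A's enumerate loop with early return, as structural recursion over the chars,
-- carrying the index i, the length n and the counter st
def blLoop (cs : List Char) (n i st : Int) : String :=
  match cs with
  | [] => "NO"
  | c :: rest =>
    if c = '(' then blLoop rest n (i + 1) (st + 1)
    else if c = ')' then
      if st - 1 = 0 ∧ i ≠ n - 1 then "YES" else blLoop rest n (i + 1) (st - 1)
    else blLoop rest n (i + 1) st

def bl (s : String) : String := blLoop s.toList (s.toList.length : Int) 0 0

-- ===== PORT B =====
-- the descending loop 'for i in range(len(s)-2, -1, -1)' visits the characters of
-- s[:-1] back to front, i.e. the tail of s.toList.reverse, carrying suf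
def blRev (cs : List Char) (total suf : Int) : String :=
  match cs with
  | [] => "NO"
  | c :: rest =>
    if c = ')' ∧ suf = total then "YES"
    else blRev rest total
      (suf + (if c = '(' then 1 else 0) - (if c = ')' then 1 else 0))

def bl_alt (s : String) : String :=
  match s.toList.reverse with
  | [] => "NO"   -- if not s
  | last :: rest =>
    let total : Int := (s.toList.count '(' : Int) - (s.toList.count ')' : Int)
    blRev rest total ((if last = '(' then 1 else 0) - (if last = ')' then 1 else 0))

-- ===== PRECONDITION & SPEC =====
def Spec_bl (s : String) (out : String) : Prop := out = bl_alt s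
instance (s : String) (out : String) : Decidable (Spec_bl s out) := by unfold Spec_bl; infer_instance

-- ===== CLAIM (what is proved, stated in full; the proofs are below) =====
def Claim_equal_bl : Prop := ∀ (s : String), Dom_bl s → Spec_bl s (bl s)

-- ===== LEMMAS AND PROOFS =====

-- balance of a chunk of characters
def bal (cs : List Char) : Int := (cs.count '(' : Int) - (cs.count ')' : Int)

theorem bal_nil : bal [] = 0 := by simp [bal]

theorem bal_cons (c : Char) (cs : List Char) :
    bal (c :: cs) = ((if c = '(' then 1 else 0) - (if c = ')' then 1 else 0)) + bal cs := by
  simp only [bal, List.count_cons]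
  by_cases h1 : c = '(' <;> by_cases h2 : c = ')' <;>
    simp_all <;> ring

theorem bal_append (xs ys : List Char) : bal (xs ++ ys) = bal xs + bal ys := by
  simp [bal, List.count_append]; ring

theorem bal_reverse (xs : List Char) : bal xs.reverse = bal xs := by
  simp [bal, List.count_reverse]

-- A's loop says YES iff some proper balanced prefix ends with ')'
theorem blLoop_yes (cs : List Char) : ∀ (st i n : Int), i + cs.length = n →
    (blLoop cs n i st = "YES" ↔
      ∃ xs ys, cs = xs ++ ')' :: ys ∧ ys ≠ [] ∧ st + bal xs = 1) := by
  induction cs with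
  | nil =>
    intro st i n _
    simp [blLoop]
  | cons c rest ih =>
    intro st i n hn
    have hn' : (i + 1) + (rest.length : Int) = n := by
      simp only [List.length_cons] at hn; push_cast at hn ⊢; omega
    by_cases hop : c = '('
    · subst hop
      rw [show blLoop ('(' :: rest) n i st = blLoop rest n (i + 1) (st + 1) from rfl,
        ih (st + 1) (i + 1) n hn']
      constructor
      · rintro ⟨xs, ys, h, hne, hb⟩
        exact ⟨'(' :: xs, ys, by simp [h], hne, by rw [bal_cons] at *; simp at *; omega⟩
      · rintro ⟨xs, ys, h, hne, hb⟩
        cases xs with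
        | nil => simp at h
        | cons x xs' =>
          simp only [List.cons_append, List.cons.injEq] at h
          obtain ⟨hx, h⟩ := h
          subst hx
          refine ⟨xs', ys, h, hne, ?_⟩
          rw [bal_cons] at hb; simp at hb; omega
    · by_cases hcl : c = ')'
      · subst hcl
        have hlast : (i ≠ n - 1) ↔ rest ≠ [] := by
          constructor
          · intro h hr; subst hr; simp at hn'; omega
          · intro hr h
            subst h
            have hlen : (rest.length : Int) = 0 := by omega
            cases rest with
            | nil => exact hr rfl
            | cons a b => simp at hlen; omega
        rw [show blLoop (')' :: rest) n i st =
            (if st - 1 = 0 ∧ i ≠ n - 1 then "YES" else blLoop rest n (i + 1) (st - 1)) from rfl]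
        by_cases hz : st - 1 = 0 ∧ i ≠ n - 1
        · rw [if_pos hz]
          constructor
          · intro _
            exact ⟨[], rest, rfl, hlast.mp hz.2, by rw [bal_nil]; omega⟩
          · intro _; rfl
        · rw [if_neg hz, ih (st - 1) (i + 1) n hn']
          constructor
          · rintro ⟨xs, ys, h, hne, hb⟩
            exact ⟨')' :: xs, ys, by simp [h], hne, by rw [bal_cons] at *; simp at *; omega⟩
          · rintro ⟨xs, ys, h, hne, hb⟩
            cases xs with
            | nil =>
              simp only [List.nil_append, List.cons.injEq] at h
              rw [bal_nil] at hb
              exact absurd ⟨by omega, hlast.mpr (h.2 ▸ hne)⟩ hz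
            | cons x xs' =>
              simp only [List.cons_append, List.cons.injEq] at h
              obtain ⟨hx, h⟩ := h
              subst hx
              refine ⟨xs', ys, h, hne, ?_⟩
              rw [bal_cons] at hb; simp at hb; omega
      · rw [show blLoop (c :: rest) n i st = blLoop rest n (i + 1) st by
            simp [blLoop, hop, hcl], ih st (i + 1) n hn']
        constructor
        · rintro ⟨xs, ys, h, hne, hb⟩
          exact ⟨c :: xs, ys, by simp [h], hne,
            by rw [bal_cons]; simp [hop, hcl]; omega⟩
        · rintro ⟨xs, ys, h, hne, hb⟩
          cases xs with
          | nil => simp only [List.nil_append, List.cons.injEq] at h; exact absurd h.1 hcl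
          | cons x xs' =>
            simp only [List.cons_append, List.cons.injEq] at h
            obtain ⟨hx, h⟩ := h
            subst hx
            refine ⟨xs', ys, h, hne, ?_⟩
            rw [bal_cons] at hb; simp [hop, hcl] at hb; omega

-- B's backward loop says YES iff some split at a ')' matches the total
theorem blRev_yes (cs : List Char) : ∀ (total suf : Int),
    (blRev cs total suf = "YES" ↔
      ∃ as bs, cs = as ++ ')' :: bs ∧ suf + bal as = total) := by
  induction cs with
  | nil => intro total suf; simp [blRev]
  | cons c rest ih =>
    intro total suf
    rw [show blRev (c :: rest) total suf =
        (if c = ')' ∧ suf = total then "YES"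
         else blRev rest total
           (suf + (if c = '(' then 1 else 0) - (if c = ')' then 1 else 0))) from rfl]
    by_cases hc : c = ')' ∧ suf = total
    · rw [if_pos hc]
      constructor
      · intro _
        exact ⟨[], rest, by simp [hc.1], by rw [bal_nil]; omega⟩
      · intro _; rfl
    · rw [if_neg hc, ih]
      constructor
      · rintro ⟨as, bs, h, hb⟩
        refine ⟨c :: as, bs, by simp [h], ?_⟩
        rw [bal_cons]
        by_cases h1 : c = '(' <;> by_cases h2 : c = ')' <;> simp_all <;> omega
      · rintro ⟨as, bs, h, hb⟩
        cases as with
        | nil =>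
          simp only [List.nil_append, List.cons.injEq] at h
          rw [bal_nil] at hb
          exact absurd ⟨h.1, by omega⟩ hc
        | cons x as' =>
          simp only [List.cons_append, List.cons.injEq] at h
          obtain ⟨hx, h⟩ := h
          subst hx
          refine ⟨as', bs, h, ?_⟩
          rw [bal_cons] at hb
          by_cases h1 : c = '(' <;> by_cases h2 : c = ')' <;> simp_all <;> omega

-- every run of either loop returns "YES" or "NO"
theorem blLoop_cases (cs : List Char) : ∀ (n i st : Int),
    blLoop cs n i st = "YES" ∨ blLoop cs n i st = "NO" := by
  induction cs with
  | nil => intro n i st; right; rfl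
  | cons c rest ih =>
    intro n i st
    simp only [blLoop]
    split_ifs <;> first | (left; rfl) | exact ih n _ _

theorem blRev_cases (cs : List Char) : ∀ (total suf : Int),
    blRev cs total suf = "YES" ∨ blRev cs total suf = "NO" := by
  induction cs with
  | nil => intro total suf; right; rfl
  | cons c rest ih =>
    intro total suf
    simp only [blRev]
    split_ifs <;> first | (left; rfl) | exact ih _ _

-- the two existential characterisations coincide
theorem exists_bridge (front : List Char) (last : Char) :
    (∃ xs ys, front ++ [last] = xs ++ ')' :: ys ∧ ys ≠ [] ∧ (0 : Int) + bal xs = 1) ↔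
    (∃ as bs, front.reverse = as ++ ')' :: bs ∧
      ((if last = '(' then 1 else 0) - (if last = ')' then 1 else 0) : Int) + bal as
        = bal (front ++ [last])) := by
  have hδ : bal [last] = ((if last = '(' then 1 else 0) - (if last = ')' then 1 else 0) : Int) := by
    rw [bal_cons, bal_nil]; omega
  constructor
  · rintro ⟨xs, ys, h, hne, hb⟩
    obtain ⟨ys', y, rfl⟩ : ∃ ys' y, ys = ys' ++ [y] := by
      rcases List.eq_nil_or_concat ys with rfl | ⟨a, b, hab⟩
      · exact absurd rfl hne
      · exact ⟨a, b, by simpa using hab⟩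
    rw [show xs ++ ')' :: (ys' ++ [y]) = (xs ++ ')' :: ys') ++ [y] by simp] at h
    obtain ⟨hfront, -⟩ := List.append_inj' h rfl
    refine ⟨ys'.reverse, xs.reverse, by simp [hfront], ?_⟩
    rw [hfront]
    simp only [bal_append, bal_cons, bal_nil, bal_reverse] at hb ⊢
    by_cases h1 : last = '(' <;> by_cases h2 : last = ')' <;> simp_all <;> omega
  · rintro ⟨as, bs, h, hb⟩
    have hfront : front = bs.reverse ++ ')' :: as.reverse := by
      have := congrArg List.reverse h
      simpa using this
    refine ⟨bs.reverse, as.reverse ++ [last], by simp [hfront], by simp, ?_⟩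
    rw [hfront] at hb
    simp only [bal_append, bal_cons, bal_nil, bal_reverse] at hb ⊢
    by_cases h1 : last = '(' <;> by_cases h2 : last = ')' <;> simp_all <;> omega

-- ===== VERDICT (by name: the statement is the Claim_ definition above) =====
theorem bl_spec : Claim_equal_bl := by
  intro s _
  unfold Spec_bl bl bl_alt
  cases hrev : s.toList.reverse with
  | nil =>
    have : s.toList = [] := by simpa using congrArg List.reverse hrev
    rw [this]; rfl
  | cons last rest =>
    have hcs : s.toList = rest.reverse ++ [last] := by
      have := congrArg List.reverse hrev
      simpa using this
    have hiffA := blLoop_yes s.toList 0 0 (s.toList.length : Int) (by simp)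
    have hiffB := blRev_yes rest
      ((s.toList.count '(' : Int) - (s.toList.count ')' : Int))
      ((if last = '(' then 1 else 0) - (if last = ')' then 1 else 0))
    have hbridge := exists_bridge rest.reverse last
    rw [List.reverse_reverse] at hbridge
    have htot : ((List.count '(' (rest.reverse ++ [last]) : Int)
          - (List.count ')' (rest.reverse ++ [last]) : Int))
        = bal (rest.reverse ++ [last]) := rfl
    have hyes : blLoop s.toList (s.toList.length : Int) 0 0 = "YES" ↔
        blRev rest ((s.toList.count '(' : Int) - (s.toList.count ')' : Int))
          ((if last = '(' then 1 else 0) - (if last = ')' then 1 else 0)) = "YES" := by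
      rw [hiffA, hiffB, hcs, htot]
      exact hbridge
    rcases blLoop_cases s.toList (s.toList.length : Int) 0 0 with hA | hA <;>
      rcases blRev_cases rest ((s.toList.count '(' : Int) - (s.toList.count ')' : Int))
        ((if last = '(' then 1 else 0) - (if last = ')' then 1 else 0)) with hB | hB <;>
      simp_all
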